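-- pv_equiv track=rewrite | github.com/sarat-asymmetrica/prismflow | scripts/abd/abd_v1.py | _classify_errors
-- ===== SOURCE A (Python) =====
-- from typing import List, Dict, Optional, Tuple
--
-- def _classify_errors(errors: List[Dict]) -> Dict[str, List[Dict]]:
--     """
--     [κ] Knowledge: Classify errors by type
--     [σ] Semantic: Groups related errors for batch fixing
--     """
--     classified = {
--         'module_not_found': [],
--         'dependency_missing': [],
--         'dependency_conflict': [],
--         'peer_dependency': [],
--         'config_error': [],
--         'export_not_found': [],
--         'syntax_error': [],
--         'version_conflict': [],
--         'unknown': []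
--     }
--
--     for error in errors:
--         error_type = error.get('type', 'unknown')
--
--         if error_type in classified:
--             classified[error_type].append(error)
--         else:
--             classified['unknown'].append(error)
--
--     return classified
-- ===== SOURCE B (Python) =====
-- from typing import List, Dict
--
-- _CATEGORIES = [
--     'module_not_found',
--     'dependency_missing',
--     'dependency_conflict',
--     'peer_dependency',
--     'config_error',
--     'export_not_found',
--     'syntax_error',
--     'version_conflict',
--     'unknown',
-- ]
--
-- def _norm(error: Dict) -> str:
--     t = error.get('type', 'unknown')
--     return t if t in _CATEGORIES else 'unknown'
--
-- def _classify_errors(errors: List[Dict]) -> Dict[str, List[Dict]]: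
--     return {c: [e for e in errors if _norm(e) == c] for c in _CATEGORIES}
-- ===== Notes on version B (the rewrite author's own statement) =====
-- stated objective: alternative
-- what changed: Replaces A's single dispatch pass that appends into a pre-built dict of mutable buckets by a dict comprehension over the fixed category names, each value a filtering scan of errors under a type normaliser.
import Mathlib
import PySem

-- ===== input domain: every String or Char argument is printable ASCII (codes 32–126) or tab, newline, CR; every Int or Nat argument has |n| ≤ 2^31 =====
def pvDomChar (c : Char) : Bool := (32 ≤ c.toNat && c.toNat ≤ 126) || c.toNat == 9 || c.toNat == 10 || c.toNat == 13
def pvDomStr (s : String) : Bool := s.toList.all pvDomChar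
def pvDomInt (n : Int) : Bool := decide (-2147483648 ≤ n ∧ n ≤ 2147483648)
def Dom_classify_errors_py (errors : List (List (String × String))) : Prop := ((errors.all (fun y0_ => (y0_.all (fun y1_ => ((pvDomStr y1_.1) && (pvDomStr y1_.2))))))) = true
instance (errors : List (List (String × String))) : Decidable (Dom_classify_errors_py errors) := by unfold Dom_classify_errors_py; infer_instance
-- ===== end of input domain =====

-- B replaces A's single dict-dispatch pass by a comprehension over the nine fixed category
-- names, each bucket a filtering scan of errors under a type normaliser (alternative, same cost).

-- ===== PORT A =====
def classify_errors_py (errors : List (List (String × String))) : List (String × List (List (String × String))) :=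
  let classified : PySem.Dict String (List (List (String × String))) :=
    ((((((((PySem.Dict.empty.insert "module_not_found" []).insert "dependency_missing" []).insert
      "dependency_conflict" []).insert "peer_dependency" []).insert "config_error" []).insert
      "export_not_found" []).insert "syntax_error" []).insert "version_conflict" []).insert "unknown" []
  let final := errors.foldl (fun d error =>
    let error_type := (PySem.Dict.mk error).getD "type" "unknown"
    if d.contains error_type then
      d.modify error_type [] (fun l => l ++ [error])
    else
      d.modify "unknown" [] (fun l => l ++ [error])) classified
  final.items

-- ===== PORT B =====
def pvCats : List String :=
  ["module_not_found", "dependency_missing", "dependency_conflict", "peer_dependency",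
   "config_error", "export_not_found", "syntax_error", "version_conflict", "unknown"]

def pvNorm (error : List (String × String)) : String :=
  let t := (PySem.Dict.mk error).getD "type" "unknown"
  if pvCats.contains t then t else "unknown"

def classify_errors_py_alt (errors : List (List (String × String))) : List (String × List (List (String × String))) :=
  pvCats.map (fun c => (c, errors.filter (fun e => pvNorm e == c)))

-- ===== PRECONDITION & SPEC =====
def Spec_classify_errors_py (errors : List (List (String × String))) (out : List (String × List (List (String × String)))) : Prop := out = classify_errors_py_alt errors
instance (errors : List (List (String × String))) (out : List (String × List (List (String × String)))) : Decidable (Spec_classify_errors_py errors out) := by unfold Spec_classify_errors_py; infer_instance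

-- ===== CLAIM (what is proved, stated in full; the proofs are below) =====
def Claim_equal_classify_errors_py : Prop := ∀ (errors : List (List (String × String))), Dom_classify_errors_py errors → Spec_classify_errors_py errors (classify_errors_py errors)

-- ===== LEMMAS AND PROOFS =====

-- A's loop step, named for the proofs
def pvStep (d : PySem.Dict String (List (List (String × String)))) (error : List (String × String)) :
    PySem.Dict String (List (List (String × String))) :=
  let error_type := (PySem.Dict.mk error).getD "type" "unknown"
  if d.contains error_type then
    d.modify error_type [] (fun l => l ++ [error])
  else
    d.modify "unknown" [] (fun l => l ++ [error])

theorem pvNorm_mem (e : List (String × String)) : pvNorm e ∈ pvCats := by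
  unfold pvNorm
  by_cases hm : pvCats.contains ((PySem.Dict.mk e).getD "type" "unknown")
  · rw [if_pos hm]; exact List.mem_of_elem_eq_true hm
  · rw [if_neg hm]; decide

theorem pvStep_eq_modify_norm (d : PySem.Dict String (List (List (String × String))))
    (e : List (String × String)) (h : d.keys = pvCats) :
    pvStep d e = d.modify (pvNorm e) [] (fun l => l ++ [e]) := by
  have hc : d.contains ((PySem.Dict.mk e).getD "type" "unknown")
      = pvCats.contains ((PySem.Dict.mk e).getD "type" "unknown") := by
    rw [PySem.Dict.contains_eq_decide_mem_keys, h]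
    simp
  simp [pvStep, pvNorm, hc]
  split <;> rfl

theorem pvKeys_modify_norm (d : PySem.Dict String (List (List (String × String))))
    (e : List (String × String)) (h : d.keys = pvCats) :
    (d.modify (pvNorm e) [] (fun l => l ++ [e])).keys = pvCats := by
  have hc : d.contains (pvNorm e) = true := by
    rw [PySem.Dict.contains_eq_decide_mem_keys, h]
    simp [pvNorm_mem]
  rw [PySem.Dict.keys_modify, PySem.Dict.keys_insert_of_contains, h]
  exact hc

theorem pvLoop_items (errors : List (List (String × String)))
    (d : PySem.Dict String (List (List (String × String)))) (h : d.keys = pvCats) :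
    (errors.foldl pvStep d).items
      = pvCats.map (fun c => (c, d.getD c [] ++ errors.filter (fun e => pvNorm e == c))) := by
  induction errors generalizing d with
  | nil =>
      simp only [List.foldl_nil, List.filter_nil, List.append_nil]
      rw [PySem.Dict.items_eq_map_keys d (by rw [h]; decide) [], h]
  | cons e es ih =>
      rw [List.foldl_cons, pvStep_eq_modify_norm d e h,
        ih _ (pvKeys_modify_norm d e h)]
      apply List.map_congr_left
      intro c _
      rw [PySem.Dict.getD_modify]
      by_cases hce : c = pvNorm e
      · simp [hce, List.append_assoc]
      · have : (pvNorm e == c) = false := by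
          simp; exact fun hh => hce hh.symm
        simp [hce, this]

-- ===== VERDICT (by name: the statement is the Claim_ definition above) =====
theorem classify_errors_py_spec : Claim_equal_classify_errors_py := by
  intro errors _
  unfold Spec_classify_errors_py classify_errors_py classify_errors_py_alt
  show (errors.foldl pvStep _).items = _
  rw [pvLoop_items _ _ (by decide)]
  apply List.map_congr_left
  intro c hc
  fin_cases hc <;> simp [PySem.Dict.getD_insert]
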